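-- pv_equiv track=rewrite | github.com/YNK99/Baekjoon | 프로그래머스/lv2/92335. k진수에서 소수 개수 구하기/k진수에서 소수 개수 구하기.py | solution
-- ===== SOURCE A (Python) =====
-- import math
--
-- def solution(n, k):
--     answer = 0
--     num = ""
--     while n > 0:
--         n, mod = divmod(n, k)
--         num += str(mod)
--     num = num[::-1]
--     num = num.split("0")
--     num = [int(c) for c in num if c != "1" and c != ""]
--     for x in num:
--         a = 1
--         for i in range(2, int(math.sqrt(x)) + 1):
--             if x%i == 0:
--                 a = 0
--                 break
--         answer += a
--
--     return answer
-- ===== SOURCE B (Python) =====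
-- import math
--
--
-- def _is_prime(x):
--     for i in range(2, int(math.sqrt(x)) + 1):
--         if x % i == 0:
--             return False
--     return True
--
--
-- def solution(n, k):
--     # One pass over the base-k digits; groups are finalized on the fly,
--     # no full numeral string is built, reversed or split.
--     answer = 0
--     cur = ""
--     while n > 0:
--         n, mod = divmod(n, k)
--         for ch in str(mod):
--             if ch == "0":
--                 if cur != "" and cur != "1" and _is_prime(int(cur)):
--                     answer += 1
--                 cur = ""
--             else:
--                 cur = ch + cur
--     if cur != "" and cur != "1" and _is_prime(int(cur)):
--         answer += 1
--     return answer
-- ===== Notes on version B (the rewrite author's own statement) =====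
-- stated objective: alternative
-- what changed: Replaces A's build-whole-numeral-string / reverse / split('0') / list-comprehension pipeline by a single streaming pass: groups are maintained in an accumulator (prepend non-zero chars, flush-and-test on '0', final flush), with primality factored into an is_prime helper.
import Mathlib
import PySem

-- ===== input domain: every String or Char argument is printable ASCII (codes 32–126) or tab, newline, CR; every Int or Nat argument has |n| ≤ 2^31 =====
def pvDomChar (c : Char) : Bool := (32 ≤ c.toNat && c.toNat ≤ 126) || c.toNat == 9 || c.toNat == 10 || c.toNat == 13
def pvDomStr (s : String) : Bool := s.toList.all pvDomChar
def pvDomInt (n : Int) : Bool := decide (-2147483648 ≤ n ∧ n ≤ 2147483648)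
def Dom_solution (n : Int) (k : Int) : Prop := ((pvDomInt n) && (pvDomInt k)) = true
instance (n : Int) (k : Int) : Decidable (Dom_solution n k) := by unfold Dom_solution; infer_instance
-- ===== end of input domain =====

-- B replaces A's build-string / reverse / split pipeline by a streaming pass with a group
-- accumulator (objective: alternative decomposition, same asymptotic cost).
-- Both Pythons compute int(math.sqrt(x)); it is ported as Nat.sqrt (floor square root), which is
-- what float sqrt yields for every x < 2^52 (and both ports use the same floor-sqrt bound).

-- ===== PORT A =====
-- while n > 0: n, mod = divmod(n, k); num += str(mod)      (fuel n.toNat+1 bounds the trip count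
-- on every input A terminates on; it only makes the port total)
def pvADigits (fuel : Nat) (n : Int) (k : Int) (num : List Char) : List Char :=
  match fuel with
  | 0 => num
  | fuel + 1 =>
    if 0 < n then
      match PySem.Int.divmod? n k with
      | some (q, m) => pvADigits fuel q k (num ++ PySem.Int.toChars m)
      | none => num
    else num

-- a = 1; for i in range(2, int(math.sqrt(x)) + 1): if x % i == 0: a = 0; break
-- (the range is iterated by counting i upward with fuel = its length — Python's lazy range with break)
def pvAPrimeFlag (x : Int) (fuel : Nat) (i : Int) : Int :=
  match fuel with
  | 0 => 1
  | f + 1 => if PySem.Int.mod x i = 0 then 0 else pvAPrimeFlag x f (i + 1)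

def solution (n : Int) (k : Int) : Int :=
  let num := pvADigits (n.toNat + 1) n k []
  let num := num.reverse                                    -- num[::-1]
  let groups := (PySem.Chars.split? num ['0']).getD []      -- num.split("0")
  -- [int(c) for c in num if c != "1" and c != ""]  (int(c) raises where ofChars? is none; Pre_ excludes those inputs)
  let xs := (groups.filter (fun c => !(c == ['1']) && !(c == []))).map
      (fun c => (PySem.Int.ofChars? c).getD 0)
  xs.foldl (fun answer x =>
      answer + pvAPrimeFlag x ((((Int.toNat x).sqrt : Int) + 1 - 2).toNat) 2) 0

-- ===== PORT B =====
-- for i in range(2, int(math.sqrt(x)) + 1): if x % i == 0: return False ... return True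
-- (same counting recursion for the lazy range)
def pvBTrial (x : Int) (fuel : Nat) (i : Int) : Bool :=
  match fuel with
  | 0 => true
  | f + 1 => if PySem.Int.mod x i = 0 then false else pvBTrial x f (i + 1)

def pvBIsPrime (x : Int) : Bool :=
  pvBTrial x ((((Int.toNat x).sqrt : Int) + 1 - 2).toNat) 2

-- if cur != "" and cur != "1" and _is_prime(int(cur)): answer += 1
def pvBFlush (cur : List Char) (ans : Int) : Int :=
  if !(cur == []) && !(cur == ['1']) && pvBIsPrime ((PySem.Int.ofChars? cur).getD 0) then
    ans + 1
  else ans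

-- for ch in str(mod): if ch == "0": flush else cur = ch + cur
def pvBChars (cs : List Char) (cur : List Char) (ans : Int) : List Char × Int :=
  match cs with
  | [] => (cur, ans)
  | c :: rest => if c = '0' then pvBChars rest [] (pvBFlush cur ans) else pvBChars rest (c :: cur) ans

def pvBLoop (fuel : Nat) (n : Int) (k : Int) (cur : List Char) (ans : Int) : Int :=
  match fuel with
  | 0 => pvBFlush cur ans
  | fuel + 1 =>
    if 0 < n then
      match PySem.Int.divmod? n k with
      | some (q, m) =>
        let s := pvBChars (PySem.Int.toChars m) cur ans
        pvBLoop fuel q k s.1 s.2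
      | none => pvBFlush cur ans
    else pvBFlush cur ans

def solution_alt (n : Int) (k : Int) : Int := pvBLoop (n.toNat + 1) n k [] 0

-- ===== PRECONDITION & SPEC =====
-- A raises or diverges exactly outside this: k = 0 gives ZeroDivisionError, k = 1 loops forever,
-- and a negative k not dividing n leaves a '-' inside a group, so int(c) raises ValueError.
def Pre_solution (n : Int) (k : Int) : Prop := n ≤ 0 ∨ 2 ≤ k ∨ (k ≤ -1 ∧ n % k = 0)
instance (n : Int) (k : Int) : Decidable (Pre_solution n k) := by unfold Pre_solution; infer_instance
def pvWitness_solution : Int × Int := (437674, 3)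

def Spec_solution (n : Int) (k : Int) (out : Int) : Prop := out = solution_alt n k
instance (n : Int) (k : Int) (out : Int) : Decidable (Spec_solution n k out) := by unfold Spec_solution; infer_instance

-- ===== CLAIM (what is proved, stated in full; the proofs are below) =====
def Claim_equal_solution : Prop := ∀ (n : Int) (k : Int), Dom_solution n k → Pre_solution n k → Spec_solution n k (solution n k)

-- ===== LEMMAS AND PROOFS =====

-- split on '0', directly structural (proved equal to PySem's splitOn below)
def pvGSplit : List Char → List (List Char)
  | [] => [[]]
  | a :: rest =>
    if a = '0' then [] :: pvGSplit rest
    else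
      match pvGSplit rest with
      | [] => [[a]]
      | g :: gs => (a :: g) :: gs

-- the contribution of one finished group, and the count over a char stream
def pvTerm (c : List Char) : Int :=
  if !(c == ['1']) && !(c == []) then
    pvAPrimeFlag ((PySem.Int.ofChars? c).getD 0)
      ((((Int.toNat ((PySem.Int.ofChars? c).getD 0)).sqrt : Int) + 1 - 2).toNat) 2
  else 0

def pvAcnt (m : List Char) : Int := ((pvGSplit m).map pvTerm).sum

lemma pvGSplit_ne_nil (m : List Char) : pvGSplit m ≠ [] := by
  cases m with
  | nil => simp [pvGSplit]
  | cons a rest =>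
    simp only [pvGSplit]
    split
    · simp
    · cases h : pvGSplit rest <;> simp

lemma pvGSplit_append_zero (m y : List Char) :
    pvGSplit (m ++ '0' :: y) = pvGSplit m ++ pvGSplit y := by
  induction m with
  | nil => simp [pvGSplit]
  | cons a rest ih =>
    simp only [List.cons_append, pvGSplit, ih]
    split
    · simp
    · cases h : pvGSplit rest with
      | nil => exact absurd h (pvGSplit_ne_nil rest)
      | cons g gs => simp

lemma pvGSplit_zfree (y : List Char) (hy : '0' ∉ y) : pvGSplit y = [y] := by
  induction y with
  | nil => simp [pvGSplit]
  | cons a rest ih =>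
    simp only [List.mem_cons, not_or] at hy
    simp only [pvGSplit, if_neg (Ne.symm hy.1), ih hy.2]

lemma pvAcnt_append_zero (m y : List Char) (hy : '0' ∉ y) :
    pvAcnt (m ++ '0' :: y) = pvAcnt m + pvTerm y := by
  simp [pvAcnt, pvGSplit_append_zero, pvGSplit_zfree y hy]

lemma pvAcnt_zfree (y : List Char) (hy : '0' ∉ y) : pvAcnt y = pvTerm y := by
  simp [pvAcnt, pvGSplit_zfree y hy]

-- A's break-flag loop is 0/1 according to B's boolean trial division
lemma pvAPrimeFlag_eq_trial (x : Int) (fuel : Nat) (i : Int) :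
    pvAPrimeFlag x fuel i = if pvBTrial x fuel i then 1 else 0 := by
  induction fuel generalizing i with
  | zero => simp [pvAPrimeFlag, pvBTrial]
  | succ f ih =>
    simp only [pvAPrimeFlag, pvBTrial]
    split <;> simp [ih]

lemma pvBFlush_eq (cur : List Char) (ans : Int) :
    pvBFlush cur ans = ans + pvTerm cur := by
  simp only [pvBFlush, pvTerm, pvBIsPrime, pvAPrimeFlag_eq_trial]
  by_cases h1 : cur == []
  · simp at h1; subst h1; simp
  · by_cases h2 : cur == ['1']
    · simp at h2; subst h2; simp
    · simp only [h1, h2]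
      split <;> simp_all

-- the char-stream invariant: processing cs prepend/flush-wise moves cs.reverse into the count
lemma pvBChars_inv (cs : List Char) (cur : List Char) (ans : Int) (m : List Char)
    (hcur : '0' ∉ cur) :
    '0' ∉ (pvBChars cs cur ans).1 ∧
      (pvBChars cs cur ans).2 + pvAcnt (m ++ (pvBChars cs cur ans).1) =
        ans + pvAcnt (m ++ cs.reverse ++ cur) := by
  induction cs generalizing cur ans m with
  | nil => exact ⟨hcur, by simp [pvBChars]⟩
  | cons c rest ih =>
    have e : pvBChars (c :: rest) cur ans =
        if c = '0' then pvBChars rest [] (pvBFlush cur ans) else pvBChars rest (c :: cur) ans := rfl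
    rw [e]
    by_cases hc : c = '0'
    · rw [if_pos hc]; subst hc
      obtain ⟨h1, h2⟩ := ih [] (pvBFlush cur ans) m (by simp)
      refine ⟨h1, ?_⟩
      rw [h2, pvBFlush_eq]
      have e2 : m ++ ('0' :: rest).reverse ++ cur = (m ++ rest.reverse) ++ '0' :: cur := by
        simp
      rw [e2, pvAcnt_append_zero _ _ hcur]
      simp
      ring
    · rw [if_neg hc]
      obtain ⟨h1, h2⟩ := ih (c :: cur) ans m
        (by simp only [List.mem_cons, not_or]; exact ⟨Ne.symm hc, hcur⟩)
      refine ⟨h1, ?_⟩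
      rw [h2]
      have e2 : m ++ (c :: rest).reverse ++ cur = m ++ rest.reverse ++ (c :: cur) := by simp
      rw [e2]

lemma pvADigits_append (fuel : Nat) (n k : Int) (num : List Char) :
    pvADigits fuel n k num = num ++ pvADigits fuel n k [] := by
  induction fuel generalizing n num with
  | zero => simp [pvADigits]
  | succ fuel ih =>
    simp only [pvADigits]
    split
    · cases h : PySem.Int.divmod? n k with
      | none => simp
      | some p =>
        obtain ⟨q, m2⟩ := p
        show pvADigits fuel q k (num ++ PySem.Int.toChars m2) =
          num ++ pvADigits fuel q k ([] ++ PySem.Int.toChars m2)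
        rw [ih q (num ++ PySem.Int.toChars m2), ih q ([] ++ PySem.Int.toChars m2)]
        simp
    · simp

-- main loop invariant: B's state machine counts exactly A's groups of the reversed digit string
lemma pvLoop_eq (fuel : Nat) (n k : Int) (cur : List Char) (ans : Int)
    (hcur : '0' ∉ cur) :
    pvBLoop fuel n k cur ans = ans + pvAcnt ((pvADigits fuel n k []).reverse ++ cur) := by
  induction fuel generalizing n cur ans with
  | zero => simp [pvBLoop, pvADigits, pvBFlush_eq, pvAcnt_zfree cur hcur]
  | succ fuel ih =>
    simp only [pvBLoop, pvADigits]
    split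
    · cases h : PySem.Int.divmod? n k with
      | none => simp [pvBFlush_eq, pvAcnt_zfree cur hcur]
      | some p =>
        obtain ⟨q, m2⟩ := p
        show pvBLoop fuel q k (pvBChars (PySem.Int.toChars m2) cur ans).1
            (pvBChars (PySem.Int.toChars m2) cur ans).2 =
          ans + pvAcnt ((pvADigits fuel q k ([] ++ PySem.Int.toChars m2)).reverse ++ cur)
        obtain ⟨h1, h2⟩ := pvBChars_inv (PySem.Int.toChars m2) cur ans
          ((pvADigits fuel q k []).reverse) hcur
        rw [ih q _ _ h1, pvADigits_append fuel q k ([] ++ PySem.Int.toChars m2)]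
        simp only [List.nil_append, List.reverse_append, List.append_assoc] at h2 ⊢
        omega
    · simp [pvBFlush_eq, pvAcnt_zfree cur hcur]

-- PySem's split on the one-char separator "0" is pvGSplit
lemma pvSplitOn_go_eq (fuel : Nat) (l cur : List Char) (acc : List (List Char))
    (h : l.length ≤ fuel) :
    PySem.Chars.splitOn.go ['0'] fuel l cur acc =
      acc.reverse ++ (match pvGSplit l with
        | [] => []
        | g :: gs => (cur.reverse ++ g) :: gs) := by
  induction fuel generalizing l cur acc with
  | zero =>
    have : l = [] := by cases l <;> simp_all
    subst this
    simp [PySem.Chars.splitOn.go, pvGSplit]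
  | succ fuel ih =>
    cases l with
    | nil => simp [PySem.Chars.splitOn.go, pvGSplit]
    | cons c rest =>
      simp only [PySem.Chars.splitOn.go]
      by_cases hc : c = '0'
      · subst hc
        rw [if_pos (by simp)]
        rw [show List.drop (['0'] : List Char).length ('0' :: rest) = rest from rfl]
        rw [ih rest [] (cur.reverse :: acc) (by simpa using h)]
        cases hg : pvGSplit rest with
        | nil => exact absurd hg (pvGSplit_ne_nil rest)
        | cons g gs => simp [pvGSplit, hg]
      · rw [if_neg (by simp; exact fun h => hc h.symm)]
        rw [ih rest (c :: cur) acc (by simpa using h)]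
        cases hg : pvGSplit rest with
        | nil => exact absurd hg (pvGSplit_ne_nil rest)
        | cons g gs => simp [pvGSplit, hc, hg]

lemma pvSplit_eq (s : List Char) :
    (PySem.Chars.split? s ['0']).getD [] = pvGSplit s := by
  rw [PySem.Chars.split?]
  rw [if_neg (by simp)]
  rw [Option.getD_some, PySem.Chars.splitOn,
    pvSplitOn_go_eq (s.length + 1) s [] [] (by omega)]
  cases hg : pvGSplit s with
  | nil => exact absurd hg (pvGSplit_ne_nil s)
  | cons g gs => simp

-- the filtered comprehension-sum equals the total over all groups (filtered-out groups contribute 0)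
lemma pvSum_groups (gs : List (List Char)) :
    ((gs.filter (fun c => !(c == ['1']) && !(c == []))).map
      (fun c => pvAPrimeFlag ((PySem.Int.ofChars? c).getD 0)
        ((((Int.toNat ((PySem.Int.ofChars? c).getD 0)).sqrt : Int) + 1 - 2).toNat) 2)).sum
    = ((gs.map pvTerm)).sum := by
  induction gs with
  | nil => simp
  | cons g rest ih =>
    rw [List.filter_cons, List.map_cons, List.sum_cons]
    by_cases hp : (!(g == ['1']) && !(g == [])) = true
    · rw [if_pos hp, List.map_cons, List.sum_cons, ih]
      simp only [pvTerm]
      rw [if_pos hp]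
    · rw [if_neg hp, ih]
      simp only [pvTerm]
      rw [if_neg hp, zero_add]

-- A's pipeline equals pvAcnt of the reversed digit string
lemma pvSolution_eq_acnt (n k : Int) :
    solution n k = pvAcnt ((pvADigits (n.toNat + 1) n k []).reverse) := by
  simp only [solution]
  rw [pvSplit_eq, PySem.List.foldl_add, zero_add, List.map_map, pvAcnt]
  exact pvSum_groups _

-- ===== VERDICT (by name: the statement is the Claim_ definition above) =====
theorem solution_spec : Claim_equal_solution := by
  intro n k _ _
  show solution n k = solution_alt n k
  rw [solution_alt, pvLoop_eq _ _ _ _ _ (by simp), pvSolution_eq_acnt]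
  simp
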